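-- pv_equiv track=rewrite | github.com/allgreed/aoc-2021 | 19/main.py | compute_distances
-- ===== SOURCE A (Python) =====
-- def compute_distances(ps):
--     lv = []
--     for lp in ps:
--         lvp = set()
--         for rp in ps:
--             if lp == rp:
--                 continue
--
--             x1,y1,z1 = lp
--             x2,y2,z2 = rp
--
--             d = (x1 - x2) ** 2 + (y1 - y2) ** 2 + (z1 - z2) ** 2
--             lvp.add(d)
--         lv.append(lvp)
--     return lv
-- ===== SOURCE B (Python) =====
-- def compute_distances(ps):
--     # triangular sweep: each unordered pair's distance is computed once and
--     # pushed into both endpoints' sets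
--     out = []
--     seeds = [set() for _ in ps]
--     rest = list(ps)
--     while rest:
--         lp = rest[0]
--         rest = rest[1:]
--         s0 = seeds[0]
--         rseeds = seeds[1:]
--         for rp, s in zip(rest, rseeds):
--             if lp != rp:
--                 d = (lp[0] - rp[0]) ** 2 + (lp[1] - rp[1]) ** 2 + (lp[2] - rp[2]) ** 2
--                 s0.add(d)
--                 s.add(d)
--         out.append(s0)
--         seeds = rseeds
--     return out
-- ===== Notes on version B (the rewrite author's own statement) =====
-- stated objective: alternative
-- what changed: Replaces A's full n x n rescan (each point recomputes distances to all others) by a triangular head-peeling sweep that computes each unordered pair's distance once and adds it to both endpoints' sets.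
import Mathlib
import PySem

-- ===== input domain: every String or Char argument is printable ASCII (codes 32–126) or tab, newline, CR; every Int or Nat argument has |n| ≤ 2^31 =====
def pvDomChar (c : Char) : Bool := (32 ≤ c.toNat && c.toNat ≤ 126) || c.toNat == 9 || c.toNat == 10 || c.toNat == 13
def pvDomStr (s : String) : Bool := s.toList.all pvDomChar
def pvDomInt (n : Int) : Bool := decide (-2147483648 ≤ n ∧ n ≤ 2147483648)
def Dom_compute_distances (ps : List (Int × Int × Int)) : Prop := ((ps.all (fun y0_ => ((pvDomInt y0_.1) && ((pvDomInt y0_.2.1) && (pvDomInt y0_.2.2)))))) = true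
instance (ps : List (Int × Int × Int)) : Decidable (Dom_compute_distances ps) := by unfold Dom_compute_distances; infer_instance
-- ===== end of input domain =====

-- B replaces A's full n×n rescan by a triangular sweep computing each pair's distance once
-- and adding it to both endpoints' sets (objective: alternative decomposition, same order of growth).

-- squared euclidean distance, the expression both Pythons compute inline
def pvDist (a b : Int × Int × Int) : Int :=
  (a.1 - b.1) ^ 2 + (a.2.1 - b.2.1) ^ 2 + (a.2.2 - b.2.2) ^ 2

-- ===== PORT A =====
def compute_distances (ps : List (Int × Int × Int)) : List (List Int) :=
  ps.foldl (fun lv lp =>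
    lv ++ [ps.foldl (fun lvp rp =>
            if lp = rp then lvp
            else PySem.Set.add lvp (pvDist lp rp)) PySem.Set.empty]) []

-- ===== PORT B =====
-- body of Source B's inner `for rp, s in zip(rest, rseeds)` loop: threads (s0, rebuilt rseeds)
def pvStep (lp : Int × Int × Int) (st : List Int × List (List Int))
    (pr : (Int × Int × Int) × List Int) : List Int × List (List Int) :=
  if lp = pr.1 then (st.1, st.2 ++ [pr.2])
  else
    let d := pvDist lp pr.1
    (PySem.Set.add st.1 d, st.2 ++ [PySem.Set.add pr.2 d])

-- Source B's `while rest:` loop; seeds and rest always have equal length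
def pvLoop (out seeds : List (List Int)) (rest : List (Int × Int × Int)) : List (List Int) :=
  match rest, seeds with
  | [], _ => out
  | _ :: _, [] => out   -- unreachable from compute_distances_alt (seeds keeps rest's length)
  | lp :: rest', s0 :: rseeds =>
      let r := (rest'.zip rseeds).foldl (pvStep lp) (s0, [])
      pvLoop (out ++ [r.1]) r.2 rest'
termination_by rest.length

def compute_distances_alt (ps : List (Int × Int × Int)) : List (List Int) :=
  pvLoop [] (ps.map fun _ => PySem.Set.empty) ps

-- ===== PRECONDITION & SPEC =====
def Spec_compute_distances (ps : List (Int × Int × Int)) (out : List (List Int)) : Prop := out = compute_distances_alt ps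
instance (ps : List (Int × Int × Int)) (out : List (List Int)) : Decidable (Spec_compute_distances ps out) := by unfold Spec_compute_distances; infer_instance

-- ===== CLAIM (what is proved, stated in full; the proofs are below) =====
def Claim_equal_compute_distances : Prop := ∀ (ps : List (Int × Int × Int)), Dom_compute_distances ps → Spec_compute_distances ps (compute_distances ps)

-- ===== LEMMAS AND PROOFS =====

-- A's inner loop, started from an arbitrary set s (proof-side characterisation)
def pvRowFrom (s : List Int) (lp : (Int × Int × Int)) (qs : List (Int × Int × Int)) : List Int :=
  qs.foldl (fun lvp rp => if lp = rp then lvp else PySem.Set.add lvp (pvDist lp rp)) s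

theorem pvDist_comm (a b : Int × Int × Int) : pvDist a b = pvDist b a := by
  unfold pvDist; ring

theorem pvRowFrom_cons (s : List Int) (lp q : Int × Int × Int) (qs : List (Int × Int × Int)) :
    pvRowFrom s lp (q :: qs) = pvRowFrom (if lp = q then s else PySem.Set.add s (pvDist lp q)) lp qs := by
  simp [pvRowFrom]

-- the zip fold of B's inner loop, characterised
theorem pvStep_fold (lp : Int × Int × Int) :
    ∀ (rest : List (Int × Int × Int)) (rseeds : List (List Int)) (s0 : List Int) (acc : List (List Int)),
    rest.length = rseeds.length →
    (rest.zip rseeds).foldl (pvStep lp) (s0, acc)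
      = (pvRowFrom s0 lp rest,
         acc ++ List.zipWith (fun rp s => if lp = rp then s else PySem.Set.add s (pvDist lp rp)) rest rseeds) := by
  intro rest
  induction rest with
  | nil => intro rseeds s0 acc _; simp [pvRowFrom]
  | cons rp rest ih =>
    intro rseeds s0 acc h
    cases rseeds with
    | nil => simp at h
    | cons s rseeds =>
      simp only [List.zip_cons_cons, List.foldl_cons, List.zipWith_cons_cons]
      rw [pvRowFrom_cons]
      by_cases hq : lp = rp
      · rw [show pvStep lp (s0, acc) (rp, s) = (s0, acc ++ [s]) by simp [pvStep, hq]]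
        rw [ih rseeds s0 (acc ++ [s]) (by simpa using h)]
        simp [hq]
      · rw [show pvStep lp (s0, acc) (rp, s)
              = (PySem.Set.add s0 (pvDist lp rp), acc ++ [PySem.Set.add s (pvDist lp rp)]) by
            simp [pvStep, hq]]
        rw [ih rseeds _ _ (by simpa using h)]
        simp [hq]

-- prepending a point to the scanned list = pre-seeding each set with its distance to that point
theorem pvRow_head (lp : Int × Int × Int) (qs : List (Int × Int × Int)) :
    ∀ (xs : List (Int × Int × Int)) (ys : List (List Int)),
    List.zipWith (fun q s => pvRowFrom s q (lp :: qs)) xs ys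
      = List.zipWith (fun q s => pvRowFrom s q qs) xs
          (List.zipWith (fun q s => if lp = q then s else PySem.Set.add s (pvDist lp q)) xs ys) := by
  intro xs
  induction xs with
  | nil => intro ys; simp
  | cons x xs ih =>
    intro ys
    cases ys with
    | nil => simp
    | cons y ys =>
      simp only [List.zipWith_cons_cons, ih]
      rw [pvRowFrom_cons]
      by_cases hx : x = lp
      · simp [hx]
      · rw [if_neg hx, if_neg (fun h => hx h.symm), pvDist_comm]

theorem pvLoop_eq :
    ∀ (rest : List (Int × Int × Int)) (seeds out : List (List Int)),
    rest.length = seeds.length →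
    pvLoop out seeds rest = out ++ List.zipWith (fun lp s => pvRowFrom s lp rest) rest seeds := by
  intro rest
  induction rest with
  | nil => intro seeds out _; simp [pvLoop]
  | cons lp rest ih =>
    intro seeds out h
    cases seeds with
    | nil => simp at h
    | cons s0 rseeds =>
      rw [pvLoop]
      rw [pvStep_fold lp rest rseeds s0 [] (by simpa using h)]
      rw [ih _ _ (by simp [List.length_zipWith]; simp at h; omega)]
      rw [List.zipWith_cons_cons]
      rw [pvRowFrom_cons, if_pos rfl]
      rw [pvRow_head]
      simp

theorem zipWith_map_const {α β : Type} (f : α → β → β) (c : β) :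
    ∀ (xs : List α), List.zipWith f xs (xs.map fun _ => c) = xs.map (fun x => f x c) := by
  intro xs
  induction xs with
  | nil => rfl
  | cons x xs ih => simp only [List.map_cons, List.zipWith_cons_cons, ih]

-- ===== VERDICT (by name: the statement is the Claim_ definition above) =====
theorem compute_distances_spec : Claim_equal_compute_distances := by
  intro ps _
  show compute_distances ps = compute_distances_alt ps
  rw [compute_distances_alt, pvLoop_eq ps _ [] (by simp), zipWith_map_const]
  rw [compute_distances]
  rw [PySem.List.foldl_append_singleton_eq_map]
  rfl
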